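-- pv_equiv track=rewrite | github.com/JuManoel/hackthon2026 | Backend/Python/app/routes/analysis_router.py | build_detection_signature
-- ===== SOURCE A (Python) =====
-- def normalize_species_label(value: object) -> str:
--     normalized = str(value or "").strip().lower()
--     return normalized or "bird"
--
-- def build_detection_signature(detalles: list[dict]) -> str:
--     species_counter: dict[str, int] = {}
--     for deteccion in detalles:
--         label = normalize_species_label(deteccion.get("especie"))
--         species_counter[label] = species_counter.get(label, 0) + 1
--
--     parts = [f"count:{len(detalles)}"]
--     parts.extend(f"{label}:{count}" for label, count in sorted(species_counter.items()))
--     return "|".join(parts)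
-- ===== SOURCE B (Python) =====
-- def build_detection_signature(detalles: list[dict]) -> str:
--     # Sort the normalized labels once, then emit one "label:count" part per run,
--     # instead of accumulating a dict of counts and sorting its items.
--     labels = sorted(str(d.get("especie") or "").strip().lower() or "bird" for d in detalles)
--     parts = [f"count:{len(detalles)}"]
--     i, n = 0, len(labels)
--     while i < n:
--         j = i
--         while j < n and labels[j] == labels[i]:
--             j += 1
--         parts.append(f"{labels[i]}:{j - i}")
--         i = j
--     return "|".join(parts)
-- ===== Notes on version B (the rewrite author's own statement) =====
-- stated objective: alternative
-- what changed: Replaces the hash-map counter plus sorted(items) with sorting the normalized label list once and emitting one 'label:count' part per equal run via a two-pointer scan.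
import Mathlib
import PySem

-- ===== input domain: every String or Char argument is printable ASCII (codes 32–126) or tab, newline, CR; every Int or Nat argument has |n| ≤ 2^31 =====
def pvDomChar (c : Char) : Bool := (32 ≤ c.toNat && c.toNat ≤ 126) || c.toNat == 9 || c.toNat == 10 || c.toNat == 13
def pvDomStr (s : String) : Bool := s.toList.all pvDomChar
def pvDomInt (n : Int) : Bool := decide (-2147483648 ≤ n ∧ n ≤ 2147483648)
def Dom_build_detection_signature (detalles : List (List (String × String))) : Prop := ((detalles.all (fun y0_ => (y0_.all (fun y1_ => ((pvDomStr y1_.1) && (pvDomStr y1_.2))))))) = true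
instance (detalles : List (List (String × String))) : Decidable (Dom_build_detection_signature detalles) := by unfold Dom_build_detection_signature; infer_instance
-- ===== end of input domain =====

-- B replaces the dict counter + sorted(items) by sorting the normalized label list once and
-- walking equal runs with a two-pointer scan; same output, proved equal on all inputs.

-- ===== PORT A =====
-- 'value or ""' : for an Option String argument, None and Some "" both yield "" — Option.getD ""
-- composed with strip/lower gives exactly that (strip/lower of "" is "").
def normalize_species_label (value : Option String) : String :=
  let normalized := PySem.Str.lower (PySem.Str.strip (value.getD ""))
  if normalized = "" then "bird" else normalized

def build_detection_signature (detalles : List (List (String × String))) : String :=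
  let species_counter : PySem.Dict String Int := detalles.foldl (fun sc deteccion =>
      let label := normalize_species_label ((PySem.Dict.ofList deteccion).get? "especie")
      sc.insert label (sc.getD label 0 + 1)) PySem.Dict.empty
  let parts := ["count:" ++ PySem.Int.toStr (detalles.length : Int)]
  let parts := parts ++
    (PySem.List.sorted2 species_counter.items (fun p => p.1) (fun p => p.2)).map
      (fun p => p.1 ++ ":" ++ PySem.Int.toStr p.2)
  PySem.Str.join "|" parts

-- ===== PORT B =====
-- the two-pointer run scan of Source B: the inner 'while labels[j] == labels[i]' is the takeWhile
-- run at the current position, the outer loop resumes at j (the dropWhile remainder).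
def pvRuns : List String → List String
  | [] => []
  | x :: t =>
      (x ++ ":" ++ PySem.Int.toStr (1 + ((t.takeWhile (· == x)).length : Int)))
        :: pvRuns (t.dropWhile (· == x))
termination_by l => l.length
decreasing_by
  exact Nat.lt_succ_of_le (List.length_dropWhile_le _ _)

def build_detection_signature_alt (detalles : List (List (String × String))) : String :=
  let labels := PySem.List.sorted (detalles.map (fun d =>
      let s := PySem.Str.lower (PySem.Str.strip (((PySem.Dict.ofList d).get? "especie").getD ""))
      if s = "" then "bird" else s)) (fun x => x)
  PySem.Str.join "|" (("count:" ++ PySem.Int.toStr (detalles.length : Int)) :: pvRuns labels)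

-- ===== PRECONDITION & SPEC =====
def Spec_build_detection_signature (detalles : List (List (String × String))) (out : String) : Prop := out = build_detection_signature_alt detalles
instance (detalles : List (List (String × String))) (out : String) : Decidable (Spec_build_detection_signature detalles out) := by unfold Spec_build_detection_signature; infer_instance

-- ===== CLAIM (what is proved, stated in full; the proofs are below) =====
def Claim_equal_build_detection_signature : Prop := ∀ (detalles : List (List (String × String))), Dom_build_detection_signature detalles → Spec_build_detection_signature detalles (build_detection_signature detalles)

-- ===== LEMMAS AND PROOFS =====

-- proof-only helper: the distinct labels of an already-sorted list, in order (first of each run)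
def pvSdd : List String → List String
  | [] => []
  | x :: t => x :: pvSdd (t.dropWhile (· == x))
termination_by l => l.length
decreasing_by
  exact Nat.lt_succ_of_le (List.length_dropWhile_le _ _)


-- x is strictly below everything that survives the dropWhile of its run
theorem pvGt (x : String) (t : List String) (h : (x :: t).Pairwise (· ≤ ·)) :
    ∀ y ∈ t.dropWhile (· == x), x < y := by
  intro y hy
  have hx : ∀ y ∈ t, x ≤ y := (List.pairwise_cons.mp h).1
  have ht : t.Pairwise (· ≤ ·) := (List.pairwise_cons.mp h).2
  rcases e : t.dropWhile (· == x) with _ | ⟨h₂, r₂⟩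
  · rw [e] at hy; cases hy
  · have hw : t.dropWhile (· == x) ≠ [] := by rw [e]; simp
    have hne : (h₂ == x) = false := by
      have := List.head_dropWhile_not (· == x) hw
      simpa [e] using this
    have hne' : h₂ ≠ x := by simpa using hne
    have hxh : x < h₂ :=
      lt_of_le_of_ne (hx h₂ ((List.dropWhile_sublist _).subset (e ▸ List.mem_cons_self)))
        (Ne.symm hne')
    have hp2 : (h₂ :: r₂).Pairwise (· ≤ ·) :=
      e ▸ List.Pairwise.sublist (List.dropWhile_sublist _) ht
    rw [e] at hy
    rcases List.mem_cons.mp hy with rfl | hy'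
    · exact hxh
    · exact lt_of_lt_of_le hxh ((List.pairwise_cons.mp hp2).1 y hy')

theorem pvSdd_subset (s : List String) : ∀ y ∈ pvSdd s, y ∈ s := by
  induction s using pvSdd.induct with
  | case1 => intro y hy; rw [pvSdd] at hy; cases hy
  | case2 x t ih =>
    intro y hy
    rw [pvSdd] at hy
    rcases List.mem_cons.mp hy with rfl | hy
    · exact List.mem_cons_self
    · exact List.mem_cons_of_mem _ ((List.dropWhile_sublist _).subset (ih y hy))

theorem pvSdd_mem (s : List String) : s.Pairwise (· ≤ ·) → ∀ y ∈ s, y ∈ pvSdd s := by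
  induction s using pvSdd.induct with
  | case1 => intro _ y hy; cases hy
  | case2 x t ih =>
    intro h y hy
    rw [pvSdd]
    rcases List.mem_cons.mp hy with rfl | hy
    · exact List.mem_cons_self
    · rw [← List.takeWhile_append_dropWhile (p := (· == x)) (l := t)] at hy
      rcases List.mem_append.mp hy with hy | hy
      · have hyx : y = x := by simpa using List.mem_takeWhile_imp hy
        exact hyx ▸ List.mem_cons_self
      · have hp2 : (t.dropWhile (· == x)).Pairwise (· ≤ ·) :=
          List.Pairwise.sublist (List.dropWhile_sublist _) (List.pairwise_cons.mp h).2
        exact List.mem_cons_of_mem _ (ih hp2 y hy)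

theorem pvSdd_pairwise (s : List String) : s.Pairwise (· ≤ ·) → (pvSdd s).Pairwise (· < ·) := by
  induction s using pvSdd.induct with
  | case1 => intro _; rw [pvSdd]; exact List.Pairwise.nil
  | case2 x t ih =>
    intro h
    rw [pvSdd]
    have hp2 : (t.dropWhile (· == x)).Pairwise (· ≤ ·) :=
      List.Pairwise.sublist (List.dropWhile_sublist _) (List.pairwise_cons.mp h).2
    refine List.pairwise_cons.mpr ⟨?_, ih hp2⟩
    intro y hy
    exact pvGt x t h y (pvSdd_subset _ y hy)

theorem pvRuns_eq (s : List String) : s.Pairwise (· ≤ ·) →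
    pvRuns s = (pvSdd s).map (fun k => k ++ ":" ++ PySem.Int.toStr (s.count k : Int)) := by
  induction s using pvRuns.induct with
  | case1 => intro _; rw [pvRuns, pvSdd]; rfl
  | case2 x t ih =>
    intro h
    have hp2 : (t.dropWhile (· == x)).Pairwise (· ≤ ·) :=
      List.Pairwise.sublist (List.dropWhile_sublist _) (List.pairwise_cons.mp h).2
    rw [pvRuns, pvSdd, List.map_cons]
    congr 1
    · -- head part: the run length is the count of x in x :: t
      have hcw : List.count x (t.takeWhile (· == x)) = (t.takeWhile (· == x)).length :=
        List.count_eq_length.mpr (fun b hb => by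
          have hb' : b = x := by simpa using List.mem_takeWhile_imp hb
          exact hb'.symm)
      have hcd : List.count x (t.dropWhile (· == x)) = 0 :=
        List.count_eq_zero.mpr (fun hmem => absurd rfl (pvGt x t h x hmem).ne)
      have hts : List.count x t = (t.takeWhile (· == x)).length := by
        conv_lhs => rw [← List.takeWhile_append_dropWhile (p := (· == x)) (l := t)]
        rw [List.count_append, hcw, hcd]
        omega
      have hct : (List.count x (x :: t) : Int) = 1 + ((t.takeWhile (· == x)).length : Int) := by
        rw [List.count_cons_self, hts]; push_cast; ring
      rw [hct]
    · -- tail part: counts of later labels are unaffected by the x-run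
      rw [ih hp2]
      refine List.map_congr_left (fun k hk => ?_)
      have hkmem : k ∈ t.dropWhile (· == x) := pvSdd_subset _ k hk
      have hkx : x < k := pvGt x t h k hkmem
      have hcw : List.count k (t.takeWhile (· == x)) = 0 :=
        List.count_eq_zero.mpr (fun hmem => by
          have hk' : k = x := by simpa using List.mem_takeWhile_imp hmem
          exact absurd hk' hkx.ne')
      have hck : List.count k (x :: t) = List.count k (t.dropWhile (· == x)) := by
        rw [List.count_cons_of_ne hkx.ne]
        conv_lhs => rw [← List.takeWhile_append_dropWhile (p := (· == x)) (l := t)]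
        rw [List.count_append, hcw, Nat.zero_add]
      rw [hck]

theorem insertBy_congr {α : Type} (b1 b2 : α → α → Bool) (x : α) (ys : List α)
    (h : ∀ y ∈ ys, b1 x y = b2 x y) : PySem.List.insertBy b1 x ys = PySem.List.insertBy b2 x ys := by
  induction ys with
  | nil => rfl
  | cons y ys ih =>
    rw [PySem.List.insertBy, PySem.List.insertBy]
    rw [h y List.mem_cons_self]
    split
    · rfl
    · rw [ih (fun z hz => h z (List.mem_cons_of_mem _ hz))]

theorem foldl_insertBy_congr {α : Type} (b1 b2 : α → α → Bool) (P : α → Prop)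
    (hb : ∀ a b, P a → P b → b1 a b = b2 a b) :
    ∀ (xs acc : List α), (∀ a ∈ xs, P a) → (∀ a ∈ acc, P a) →
    xs.foldl (fun acc x => PySem.List.insertBy b1 x acc) acc
      = xs.foldl (fun acc x => PySem.List.insertBy b2 x acc) acc := by
  intro xs
  induction xs with
  | nil => intro acc _ _; rfl
  | cons x xs ih =>
    intro acc hxs hacc
    rw [List.foldl_cons, List.foldl_cons]
    rw [insertBy_congr b1 b2 x acc (fun y hy => hb x y (hxs x List.mem_cons_self) (hacc y hy))]
    exact ih _ (fun a ha => hxs a (List.mem_cons_of_mem _ ha))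
      (fun a ha => by
        rcases (PySem.List.mem_insertBy _ _ _ _).mp ha with rfl | ha
        · exact hxs a List.mem_cons_self
        · exact hacc a ha)

theorem main_eq (detalles : List (List (String × String))) :
    build_detection_signature detalles = build_detection_signature_alt detalles := by
  classical
  set f : List (String × String) → String := fun d =>
      let s := PySem.Str.lower (PySem.Str.strip (((PySem.Dict.ofList d).get? "especie").getD ""))
      if s = "" then "bird" else s with hfdef
  set labels : List String := detalles.map f with hlabels
  set s : List String := PySem.List.sorted labels (fun x => x) with hsdef
  set ys : List String := pvSdd s with hysdef
  set g : String → String × Int := fun k => (k, (List.count k labels : Int)) with hgdef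
  -- rewrite both ports into a common 'join of parts' shape
  have hA : build_detection_signature detalles =
      PySem.Str.join "|" (("count:" ++ PySem.Int.toStr (detalles.length : Int)) ::
        (PySem.List.sorted2 (PySem.Dict.counter labels).items (fun p => p.1) (fun p => p.2)).map
          (fun p => p.1 ++ ":" ++ PySem.Int.toStr p.2)) := by
    simp only [build_detection_signature, normalize_species_label, hlabels, hfdef,
      PySem.Dict.counter_eq_foldl, List.foldl_map, PySem.Dict.modify, List.singleton_append]
  have hB : build_detection_signature_alt detalles =
      PySem.Str.join "|" (("count:" ++ PySem.Int.toStr (detalles.length : Int)) :: pvRuns s) := by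
    simp only [build_detection_signature_alt, hsdef, hlabels, hfdef]
  rw [hA, hB]
  -- the sorted label list and its distinct labels
  have hs : s.Pairwise (· ≤ ·) := PySem.List.sorted_pairwise labels _
  have hys_lt : ys.Pairwise (· < ·) := pvSdd_pairwise s hs
  have hys_nodup : ys.Nodup := hys_lt.imp (fun h => h.ne)
  have hmem : ∀ a, a ∈ ys ↔ a ∈ labels := fun a =>
    ⟨fun h => (PySem.List.mem_sorted labels _ false a).mp (pvSdd_subset s a h),
     fun h => pvSdd_mem s hs a ((PySem.List.mem_sorted labels _ false a).mpr h)⟩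
  have hperm : ys.Perm (PySem.Set.ofList labels) :=
    List.perm_of_nodup_nodup_toFinset_eq hys_nodup (PySem.Set.nodup_ofList labels)
      (by ext a; simp only [List.mem_toFinset, PySem.Set.mem_ofList, hmem a])
  -- A side: the sorted counter items are exactly ys.map g
  have hitems : (PySem.Dict.counter labels).items = List.map g (PySem.Set.ofList labels) :=
    PySem.Dict.items_counter labels
  have hpairA : (ys.map g).Pairwise (fun a b => a.1 < b.1) := by
    rw [List.pairwise_map]; exact hys_lt
  have hpermA : (ys.map g).Perm ((PySem.Dict.counter labels).items) := by
    rw [hitems]; exact hperm.map g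
  have hsortA : PySem.List.sorted (PySem.Dict.counter labels).items (fun p => p.1) = ys.map g :=
    PySem.List.sorted_eq_of_perm_of_pairwise_lt _ _ _ hpermA hpairA
  -- the tuple-key sort coincides with the fst-key sort: the fst components are distinct
  have hb : ∀ a b : String × Int, a ∈ (PySem.Dict.counter labels).items →
      b ∈ (PySem.Dict.counter labels).items →
      (decide (a.1 < b.1) || (!decide (b.1 < a.1) && decide (a.2 < b.2)))
        = decide (a.1 < b.1) := by
    intro a b ha hb
    rw [hitems] at ha hb
    obtain ⟨k₁, _, rfl⟩ := List.mem_map.mp ha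
    obtain ⟨k₂, _, rfl⟩ := List.mem_map.mp hb
    rcases lt_trichotomy k₁ k₂ with hlt | heq | hgt
    · simp [hgdef, hlt]
    · subst heq; simp [hgdef]
    · simp [hgdef, hgt, asymm hgt]
  have hsorted2 : PySem.List.sorted2 (PySem.Dict.counter labels).items
      (fun p => p.1) (fun p => p.2)
      = PySem.List.sorted (PySem.Dict.counter labels).items (fun p => p.1) := by
    rw [PySem.List.sorted_eq_foldl_insertBy]
    simp only [PySem.List.sorted2, Bool.false_eq_true, if_false]
    exact foldl_insertBy_congr _ _ (fun p => p ∈ (PySem.Dict.counter labels).items)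
      hb _ [] (fun a ha => ha) (by intro a ha; cases ha)
  -- B side: the run scan of s is ys.map of the formatter
  have hcount : ∀ k, List.count k s = List.count k labels :=
    fun k => (PySem.List.sorted_perm labels (fun x => x) false).count_eq k
  have hB2 : pvRuns s = ys.map (fun k => k ++ ":" ++ PySem.Int.toStr (List.count k labels : Int)) := by
    rw [pvRuns_eq s hs]
    exact List.map_congr_left (fun k _ => by rw [hcount k])
  rw [hsorted2, hsortA, hB2, List.map_map]
  rfl

-- ===== VERDICT (by name: the statement is the Claim_ definition above) =====
theorem build_detection_signature_spec : Claim_equal_build_detection_signature := by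
  intro detalles _
  exact main_eq detalles
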